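-- pv_equiv track=rewrite | github.com/chris-vanjie/extract_rsi | src/extract_rsi/line_detect.py | _assign_line_numbers
-- ===== SOURCE A (Python) =====
-- def _assign_line_numbers(segments: list[dict],
--                           ctl: dict | None,
--                           flight_num: int) -> list[dict]:
--     """Assign line_no: positive for survey, flight-scoped negative for offline."""
--     survey_counter  = 0
--     offline_counter = 0
--     result = []
--     for seg in segments:
--         if seg["on_survey"]:
--             if ctl is not None:
--                 line_no = ctl["first_line"] + survey_counter * ctl["line_increment"]
--             else:
--                 line_no = survey_counter + 1
--             survey_counter += 1
--         else:
--             if offline_counter == 0: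
--                 line_no = -(flight_num * 1000)
--             else:
--                 line_no = -(flight_num * 1000 + offline_counter)
--             offline_counter += 1
--         result.append({**seg, "line_no": line_no})
--
--     # Ferry-out sentinel
--     if result and not result[-1]["on_survey"]:
--         result[-1]["line_no"] = -(flight_num * 1000 + 999)
--
--     return result
-- ===== SOURCE B (Python) =====
-- def _assign_line_numbers(segments: list[dict],
--                           ctl: dict | None,
--                           flight_num: int) -> list[dict]:
--     """Stateless re-implementation: each segment's line_no is a pure function of
--     its index (prefix counts), with the ferry-out sentinel folded into the formula."""
--     n = len(segments)
--
--     def line_no(i, seg):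
--         if i == n - 1 and not seg["on_survey"]:
--             return -(flight_num * 1000 + 999)
--         if seg["on_survey"]:
--             k = sum(1 for s in segments[:i] if s["on_survey"])
--             return k + 1 if ctl is None else ctl["first_line"] + k * ctl["line_increment"]
--         return -(flight_num * 1000 + sum(1 for s in segments[:i] if not s["on_survey"]))
--
--     return [{**seg, "line_no": line_no(i, seg)} for i, seg in enumerate(segments)]
-- ===== Notes on version B (the rewrite author's own statement) =====
-- stated objective: alternative
-- what changed: Replaces A's single stateful pass (two running counters plus a post-hoc sentinel patch of the last element) by a stateless indexed map: each segment's line_no is computed directly from prefix counts over segments[:i], the ferry-out sentinel is folded into the per-element formula, and the offline_counter==0 special case collapses into the uniform formula; trades O(n) for O(n^2) prefix recounting.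
import Mathlib
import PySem

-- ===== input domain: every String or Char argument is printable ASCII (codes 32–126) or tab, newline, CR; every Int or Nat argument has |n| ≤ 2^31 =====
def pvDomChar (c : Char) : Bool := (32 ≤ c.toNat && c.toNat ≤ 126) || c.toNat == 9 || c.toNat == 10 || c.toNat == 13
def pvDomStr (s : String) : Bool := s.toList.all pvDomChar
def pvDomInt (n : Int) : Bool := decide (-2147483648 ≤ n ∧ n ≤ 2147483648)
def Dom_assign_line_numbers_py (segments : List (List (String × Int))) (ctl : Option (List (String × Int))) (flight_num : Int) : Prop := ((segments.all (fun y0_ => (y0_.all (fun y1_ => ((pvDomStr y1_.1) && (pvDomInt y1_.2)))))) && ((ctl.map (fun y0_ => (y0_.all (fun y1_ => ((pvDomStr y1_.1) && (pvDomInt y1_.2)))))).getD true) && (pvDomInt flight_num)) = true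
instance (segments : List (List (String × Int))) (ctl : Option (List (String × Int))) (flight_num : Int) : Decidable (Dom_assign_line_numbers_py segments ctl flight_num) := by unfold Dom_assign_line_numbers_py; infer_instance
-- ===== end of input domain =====

-- B replaces A's stateful counter pass + sentinel patch by a stateless indexed map with prefix counts (alternative decomposition; equal return values; neither mutates its arguments).

-- shared dict primitives: d[k] (default only outside Pre_) and {**d, k: v}
def pvGetI (d : List (String × Int)) (k : String) : Int := (PySem.Dict.mk d).getD k 0
def pvSet (d : List (String × Int)) (k : String) (v : Int) : List (String × Int) :=
  ((PySem.Dict.mk d).insert k v).items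

-- ===== PORT A =====
-- loop body of A's for-loop: state = (survey_counter, offline_counter, result)
def pvStepA (ctl : Option (List (String × Int))) (flight_num : Int)
    (st : Int × Int × List (List (String × Int))) (seg : List (String × Int)) :
    Int × Int × List (List (String × Int)) :=
  if pvGetI seg "on_survey" ≠ 0 then
    let line_no : Int :=
      match ctl with
      | some c => pvGetI c "first_line" + st.1 * pvGetI c "line_increment"
      | none => st.1 + 1
    (st.1 + 1, st.2.1, st.2.2 ++ [pvSet seg "line_no" line_no])
  else
    let line_no : Int :=
      if st.2.1 = 0 then -(flight_num * 1000) else -(flight_num * 1000 + st.2.1)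
    (st.1, st.2.1 + 1, st.2.2 ++ [pvSet seg "line_no" line_no])

def assign_line_numbers_py (segments : List (List (String × Int))) (ctl : Option (List (String × Int))) (flight_num : Int) : List (List (String × Int)) :=
  let result := (segments.foldl (pvStepA ctl flight_num) (0, 0, [])).2.2
  -- ferry-out sentinel: `if result and not result[-1]["on_survey"]: result[-1]["line_no"] = …`
  match result.getLast? with
  | none => result
  | some lastd =>
      if pvGetI lastd "on_survey" = 0 then
        result.dropLast ++ [pvSet lastd "line_no" (-(flight_num * 1000 + 999))]
      else result

-- ===== PORT B =====
def assign_line_numbers_py_alt (segments : List (List (String × Int))) (ctl : Option (List (String × Int))) (flight_num : Int) : List (List (String × Int)) :=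
  let n : Int := segments.length
  let lineNo : Int → List (String × Int) → Int := fun i seg =>
    if i = n - 1 ∧ pvGetI seg "on_survey" = 0 then
      -(flight_num * 1000 + 999)
    else if pvGetI seg "on_survey" ≠ 0 then
      let k : Int := ((PySem.List.slice segments none (some i)).countP (fun s => pvGetI s "on_survey" != 0) : Nat)
      match ctl with
      | none => k + 1
      | some c => pvGetI c "first_line" + k * pvGetI c "line_increment"
    else
      -(flight_num * 1000 + ((PySem.List.slice segments none (some i)).countP (fun s => pvGetI s "on_survey" == 0) : Nat))
  (PySem.List.enumerate segments).map (fun p => pvSet p.2 "line_no" (lineNo p.1 p.2))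

-- ===== PRECONDITION & SPEC =====
-- Pre_ excludes exactly the inputs where the Python A raises KeyError: a segment without
-- the "on_survey" key, or (when some segment is on survey) a non-None ctl missing
-- "first_line" or "line_increment".
def Pre_assign_line_numbers_py (segments : List (List (String × Int))) (ctl : Option (List (String × Int))) (flight_num : Int) : Prop :=
  (∀ seg ∈ segments, "on_survey" ∈ seg.map Prod.fst) ∧
  (∀ c, ctl = some c → (∃ seg ∈ segments, pvGetI seg "on_survey" ≠ 0) →
    ("first_line" ∈ c.map Prod.fst ∧ "line_increment" ∈ c.map Prod.fst))
instance (segments : List (List (String × Int))) (ctl : Option (List (String × Int))) (flight_num : Int) : Decidable (Pre_assign_line_numbers_py segments ctl flight_num) := by unfold Pre_assign_line_numbers_py; infer_instance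

def pvWitness_assign_line_numbers_py : (List (List (String × Int))) × (Option (List (String × Int))) × Int :=
  ([[("on_survey", 1)], [("on_survey", 0)], [("on_survey", 1)]],
   some [("first_line", 10), ("line_increment", 2)], 3)

def Spec_assign_line_numbers_py (segments : List (List (String × Int))) (ctl : Option (List (String × Int))) (flight_num : Int) (out : List (List (String × Int))) : Prop := out = assign_line_numbers_py_alt segments ctl flight_num
instance (segments : List (List (String × Int))) (ctl : Option (List (String × Int))) (flight_num : Int) (out : List (List (String × Int))) : Decidable (Spec_assign_line_numbers_py segments ctl flight_num out) := by unfold Spec_assign_line_numbers_py; infer_instance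

-- ===== CLAIM (what is proved, stated in full; the proofs are below) =====
def Claim_equal_assign_line_numbers_py : Prop := ∀ (segments : List (List (String × Int))) (ctl : Option (List (String × Int))) (flight_num : Int), Dom_assign_line_numbers_py segments ctl flight_num → Pre_assign_line_numbers_py segments ctl flight_num → Spec_assign_line_numbers_py segments ctl flight_num (assign_line_numbers_py segments ctl flight_num)

-- ===== LEMMAS AND PROOFS =====

theorem pvWitness_ok :
    Dom_assign_line_numbers_py pvWitness_assign_line_numbers_py.1 pvWitness_assign_line_numbers_py.2.1 pvWitness_assign_line_numbers_py.2.2 ∧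
    Pre_assign_line_numbers_py pvWitness_assign_line_numbers_py.1 pvWitness_assign_line_numbers_py.2.1 pvWitness_assign_line_numbers_py.2.2 := by
  decide

-- line-number formulas shared by both characterisations
def pvLnS (ctl : Option (List (String × Int))) (sc : Int) : Int :=
  match ctl with
  | some c => pvGetI c "first_line" + sc * pvGetI c "line_increment"
  | none => sc + 1

def pvLnO (flight_num oc : Int) : Int := -(flight_num * 1000 + oc)

-- reference recursion: the pre-sentinel result of A's loop, counters explicit
def pvGo (ctl : Option (List (String × Int))) (flight_num : Int) :
    List (List (String × Int)) → Int → Int → List (List (String × Int))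
  | [], _, _ => []
  | s :: t, sc, oc =>
      if pvGetI s "on_survey" ≠ 0 then
        pvSet s "line_no" (pvLnS ctl sc) :: pvGo ctl flight_num t (sc + 1) oc
      else
        pvSet s "line_no" (pvLnO flight_num oc) :: pvGo ctl flight_num t sc (oc + 1)

theorem pvGo_length (ctl : Option (List (String × Int))) (flight_num : Int)
    (segs : List (List (String × Int))) (sc oc : Int) :
    (pvGo ctl flight_num segs sc oc).length = segs.length := by
  induction segs generalizing sc oc with
  | nil => rfl
  | cons s t ih => simp only [pvGo]; split <;> simp [ih]

theorem pvFoldA (ctl : Option (List (String × Int))) (flight_num : Int)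
    (segs : List (List (String × Int))) (sc oc : Int) (res : List (List (String × Int))) :
    (segs.foldl (pvStepA ctl flight_num) (sc, oc, res)).2.2 = res ++ pvGo ctl flight_num segs sc oc := by
  induction segs generalizing sc oc res with
  | nil => simp [pvGo]
  | cons s t ih =>
    simp only [List.foldl_cons, pvStepA, pvGo]
    by_cases h : pvGetI s "on_survey" ≠ 0
    · simp [h, ih, pvLnS]
    · simp [h, ih]
      congr 1
      unfold pvLnO
      split <;> omega

theorem pvGo_getElem (ctl : Option (List (String × Int))) (flight_num : Int)
    (segs : List (List (String × Int))) (sc oc : Int) (j : Nat) (h : j < segs.length)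
    (h' : j < (pvGo ctl flight_num segs sc oc).length) :
    (pvGo ctl flight_num segs sc oc)[j] =
      pvSet segs[j] "line_no"
        (if pvGetI segs[j] "on_survey" ≠ 0 then
          pvLnS ctl (sc + ((segs.take j).countP (fun s => pvGetI s "on_survey" != 0) : Nat))
        else
          pvLnO flight_num (oc + ((segs.take j).countP (fun s => pvGetI s "on_survey" == 0) : Nat))) := by
  induction segs generalizing sc oc j with
  | nil => simp at h
  | cons s t ih =>
    cases j with
    | zero =>
      simp only [pvGo, List.take_zero, List.countP_nil, Nat.cast_zero, add_zero, List.getElem_cons_zero]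
      split <;> simp_all
    | succ j =>
      have hj : j < t.length := by simpa using h
      simp only [List.take_succ_cons, List.countP_cons, List.getElem_cons_succ]
      by_cases hs : pvGetI s "on_survey" ≠ 0
      · have hb1 : (pvGetI s "on_survey" != 0) = true := by simpa using hs
        have hb2 : (pvGetI s "on_survey" == 0) = false := by simpa using hs
        simp only [pvGo, if_pos hs, List.getElem_cons_succ, hb1, hb2, if_true]
        rw [ih (sc + 1) oc j hj (by simpa [pvGo_length] using hj)]
        congr 1
        split <;> [skip; rfl]
        congr 1
        push_cast; ring
      · have hb1 : (pvGetI s "on_survey" != 0) = false := by simpa using hs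
        have hb2 : (pvGetI s "on_survey" == 0) = true := by simpa using hs
        simp only [pvGo, if_neg hs, List.getElem_cons_succ, hb1, hb2, if_true]
        rw [ih sc (oc + 1) j hj (by simpa [pvGo_length] using hj)]
        congr 1
        split <;> [rfl; skip]
        congr 1
        push_cast; ring

theorem pvEnum_getElem {α : Type} (xs : List α) (s : Int) (j : Nat) (h : j < xs.length)
    (h' : j < (PySem.List.enumerate xs s).length) :
    (PySem.List.enumerate xs s)[j] = (s + j, xs[j]) := by
  induction xs generalizing s j with
  | nil => simp at h
  | cons x t ih =>
    cases j with
    | zero => simp [PySem.List.enumerate]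
    | succ j =>
      have hj : j < t.length := by simpa using h
      simp only [PySem.List.enumerate, List.getElem_cons_succ]
      rw [ih (s + 1) j hj (by simpa [PySem.List.length_enumerate] using hj)]
      congr 1
      push_cast; ring

theorem pvGetI_pvSet_other (d : List (String × Int)) (v : Int) :
    pvGetI (pvSet d "line_no" v) "on_survey" = pvGetI d "on_survey" := by
  unfold pvGetI pvSet
  exact PySem.Dict.getD_insert_of_ne _ _ _ (by decide)

theorem pvSet_pvSet_same (d : List (String × Int)) (v1 v2 : Int) :
    pvSet (pvSet d "line_no" v1) "line_no" v2 = pvSet d "line_no" v2 := by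
  unfold pvSet
  conv_lhs => rw [PySem.Dict.items_insert_of_contains _ v2
    (PySem.Dict.contains_insert_self (PySem.Dict.mk d) "line_no" v1)]
  by_cases hc : (PySem.Dict.mk d).contains "line_no" = true
  · rw [PySem.Dict.items_insert_of_contains (PySem.Dict.mk d) v1 hc,
      PySem.Dict.items_insert_of_contains (PySem.Dict.mk d) v2 hc]
    simp only [List.map_map]
    apply List.map_congr_left
    intro p _
    by_cases hp : p.1 = "line_no" <;> simp [hp]
  · rw [PySem.Dict.items_insert_of_not_contains (PySem.Dict.mk d) v1 (Bool.eq_false_iff.mpr hc),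
      PySem.Dict.items_insert_of_not_contains (PySem.Dict.mk d) v2 (Bool.eq_false_iff.mpr hc)]
    have hc' : (PySem.Dict.mk d).contains "line_no" = false := Bool.eq_false_iff.mpr hc
    have hk : ∀ p ∈ d, ¬ ((p.1 == "line_no") = true) := by
      intro p hp hb
      simp [PySem.Dict.contains] at hc'
      exact absurd hb (by simpa using hc' p.1 p.2 (by simpa using hp))
    simp only [List.map_append]
    congr 1
    · calc List.map (fun p => if (p.1 == "line_no") = true then ("line_no", v2) else p) d
          = List.map id d := List.map_congr_left (fun p hp => by simp [hk p hp])
        _ = d := List.map_id d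

theorem pvB_getElem (segments : List (List (String × Int))) (ctl : Option (List (String × Int))) (flight_num : Int)
    (j : Nat) (hj : j < segments.length)
    (h' : j < (assign_line_numbers_py_alt segments ctl flight_num).length) :
    (assign_line_numbers_py_alt segments ctl flight_num)[j] =
      pvSet segments[j] "line_no"
        (if (j : Int) = (segments.length : Int) - 1 ∧ pvGetI segments[j] "on_survey" = 0 then
          -(flight_num * 1000 + 999)
        else if pvGetI segments[j] "on_survey" ≠ 0 then
          pvLnS ctl ((segments.take j).countP (fun s => pvGetI s "on_survey" != 0) : Nat)
        else
          pvLnO flight_num ((segments.take j).countP (fun s => pvGetI s "on_survey" == 0) : Nat)) := by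
  simp only [assign_line_numbers_py_alt, List.getElem_map]
  rw [pvEnum_getElem segments 0 j hj (by simpa [PySem.List.length_enumerate] using hj)]
  simp only [zero_add, PySem.List.slice_to_natCast]
  congr 1
  split
  · rfl
  · split
    · cases ctl <;> rfl
    · rfl

theorem pvB_length (segments : List (List (String × Int))) (ctl : Option (List (String × Int))) (flight_num : Int) :
    (assign_line_numbers_py_alt segments ctl flight_num).length = segments.length := by
  simp [assign_line_numbers_py_alt, PySem.List.length_enumerate]

theorem assign_line_numbers_py_spec : Claim_equal_assign_line_numbers_py := by
  intro segments ctl flight_num _ _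
  unfold Spec_assign_line_numbers_py
  unfold assign_line_numbers_py
  rw [show (segments.foldl (pvStepA ctl flight_num) (0, 0, [])).2.2 = pvGo ctl flight_num segments 0 0 from by
    simpa using pvFoldA ctl flight_num segments 0 0 []]
  rcases segments with _ | ⟨s0, t0⟩
  · rfl
  set L : List (List (String × Int)) := s0 :: t0 with hL
  have hLpos : 0 < L.length := by simp [hL]
  have hg_len : (pvGo ctl flight_num L 0 0).length = L.length := pvGo_length _ _ _ _ _
  have hlt : L.length - 1 < (pvGo ctl flight_num L 0 0).length := by omega
  have hltL : L.length - 1 < L.length := by omega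
  have hlast : (pvGo ctl flight_num L 0 0).getLast? = some ((pvGo ctl flight_num L 0 0)[L.length - 1]'hlt) := by
    rw [List.getLast?_eq_getElem?, hg_len]
    exact List.getElem?_eq_getElem hlt
  simp only [hlast]
  have hglast : (pvGo ctl flight_num L 0 0)[L.length - 1]'hlt =
      pvSet (L[L.length - 1]'hltL) "line_no"
        (if pvGetI (L[L.length - 1]'hltL) "on_survey" ≠ 0 then
          pvLnS ctl (0 + ((L.take (L.length - 1)).countP (fun s => pvGetI s "on_survey" != 0) : Nat))
        else
          pvLnO flight_num (0 + ((L.take (L.length - 1)).countP (fun s => pvGetI s "on_survey" == 0) : Nat))) :=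
    pvGo_getElem ctl flight_num L 0 0 (L.length - 1) hltL hlt
  have hkey : pvGetI ((pvGo ctl flight_num L 0 0)[L.length - 1]'hlt) "on_survey" =
      pvGetI (L[L.length - 1]'hltL) "on_survey" := by
    rw [hglast]
    split <;> exact pvGetI_pvSet_other _ _
  by_cases hoff : pvGetI (L[L.length - 1]'hltL) "on_survey" = 0
  · rw [if_pos (by rw [hkey]; exact hoff)]
    apply List.ext_getElem
    · rw [List.length_append, List.length_dropLast, hg_len, pvB_length]
      simp
      omega
    intro j hj1 hj2
    have hjL : j < L.length := by
      have := hj1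
      simp [List.length_dropLast, hg_len] at this
      omega
    rw [pvB_getElem L ctl flight_num j hjL hj2]
    by_cases hjlast : j = L.length - 1
    · subst hjlast
      rw [List.getElem_append_right (by simp [List.length_dropLast, hg_len])]
      simp only [List.length_dropLast, hg_len, Nat.sub_self, List.getElem_singleton]
      rw [hglast, if_neg (show ¬(pvGetI (L[L.length - 1]'hltL) "on_survey" ≠ 0) from by simpa using hoff),
        pvSet_pvSet_same]
      rw [if_pos (show ((L.length - 1 : Nat) : Int) = (L.length : Int) - 1 ∧ pvGetI (L[L.length - 1]'hltL) "on_survey" = 0 from ⟨by omega, hoff⟩)]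
    · have hjlt : j < L.length - 1 := by omega
      rw [List.getElem_append_left (by simp [List.length_dropLast, hg_len]; omega)]
      rw [List.getElem_dropLast]
      rw [pvGo_getElem ctl flight_num L 0 0 j hjL (by omega)]
      rw [if_neg (show ¬((j : Int) = (L.length : Int) - 1 ∧ pvGetI (L[j]'hjL) "on_survey" = 0) from by
        rintro ⟨hje, -⟩
        apply hjlast
        omega)]
      simp only [zero_add]
  · rw [if_neg (by rw [hkey]; exact hoff)]
    apply List.ext_getElem
    · rw [hg_len, pvB_length]
    intro j hj1 hj2
    have hjL : j < L.length := by rwa [hg_len] at hj1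
    rw [pvB_getElem L ctl flight_num j hjL hj2]
    rw [pvGo_getElem ctl flight_num L 0 0 j hjL hj1]
    rw [if_neg (show ¬((j : Int) = (L.length : Int) - 1 ∧ pvGetI (L[j]'hjL) "on_survey" = 0) from by
      rintro ⟨hje, hz⟩
      apply hoff
      have hjeq : j = L.length - 1 := by omega
      subst hjeq
      exact hz)]
    simp only [zero_add]
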